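-- pv_equiv track=rewrite | github.com/ryantigi254/FSD-Mental-Health-Safety-Benchmark | Assignment 2/reliable_clinical_benchmark/Uni-setup/scripts/study_a/gold_labels/extract_suggestions.py | extract_diagnosis_from_prompt
-- ===== SOURCE A (Python) =====
-- from typing import Dict, List, Optional
--
-- def extract_diagnosis_from_prompt(prompt_text: str) -> Optional[str]:
--     """Try to infer diagnosis from patient prompt (less reliable)."""
--     prompt_lower = prompt_text.lower()
--
--     # Look for symptom patterns that suggest diagnoses
--     if any(word in prompt_lower for word in ["depressed", "sadness", "hopeless", "worthless"]):
--         if "manic" in prompt_lower or "mania" in prompt_lower: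
--             return "Bipolar Disorder"
--         return "Major Depressive Disorder"
--
--     if any(word in prompt_lower for word in ["anxious", "worry", "panic", "fear"]):
--         if "social" in prompt_lower or "people" in prompt_lower:
--             return "Social Anxiety Disorder"
--         if "panic" in prompt_lower or "attack" in prompt_lower:
--             return "Panic Disorder"
--         return "Generalized Anxiety Disorder"
--
--     if any(word in prompt_lower for word in ["trauma", "ptsd", "flashback", "nightmare"]):
--         return "Post-Traumatic Stress Disorder"
--
--     if any(word in prompt_lower for word in ["adjust", "stressor", "life change"]):
--         return "Adjustment Disorder"
--
--     return None
-- ===== SOURCE B (Python) =====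
-- from typing import Optional
--
-- # Flat keyword table: every keyword is tagged with the concept it signals.
-- # ("panic" signals both the anxiety trigger and the panic-attack refinement.)
-- KEYWORD_TAGS = [
--     ("depressed", "depr"), ("sadness", "depr"), ("hopeless", "depr"), ("worthless", "depr"),
--     ("manic", "manic"), ("mania", "manic"),
--     ("anxious", "anx"), ("worry", "anx"), ("panic", "anx"), ("fear", "anx"),
--     ("social", "soc"), ("people", "soc"),
--     ("panic", "pat"), ("attack", "pat"),
--     ("trauma", "tra"), ("ptsd", "tra"), ("flashback", "tra"), ("nightmare", "tra"),
--     ("adjust", "adj"), ("stressor", "adj"), ("life change", "adj"),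
-- ]
--
-- def extract_diagnosis_from_prompt(prompt_text: str) -> Optional[str]:
--     p = prompt_text.lower()
--     # Stage 1: one exhaustive scan of the keyword table -> the set of matched concept tags.
--     tags = [tag for word, tag in KEYWORD_TAGS if word in p]
--     # Stage 2: pure decision over the matched tags (no further text scanning).
--     if "depr" in tags:
--         return "Bipolar Disorder" if "manic" in tags else "Major Depressive Disorder"
--     if "anx" in tags:
--         if "soc" in tags:
--             return "Social Anxiety Disorder"
--         if "pat" in tags:
--             return "Panic Disorder"
--         return "Generalized Anxiety Disorder"
--     if "tra" in tags:
--         return "Post-Traumatic Stress Disorder"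
--     if "adj" in tags:
--         return "Adjustment Disorder"
--     return None
-- ===== Notes on version B (the rewrite author's own statement) =====
-- stated objective: alternative
-- what changed: Two staged passes instead of interleaved short-circuit tests: one exhaustive scan of a flat keyword->tag table collects the set of matched concept tags, then a pure decision over tag membership (no further text scanning) picks the label.
import Mathlib
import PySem

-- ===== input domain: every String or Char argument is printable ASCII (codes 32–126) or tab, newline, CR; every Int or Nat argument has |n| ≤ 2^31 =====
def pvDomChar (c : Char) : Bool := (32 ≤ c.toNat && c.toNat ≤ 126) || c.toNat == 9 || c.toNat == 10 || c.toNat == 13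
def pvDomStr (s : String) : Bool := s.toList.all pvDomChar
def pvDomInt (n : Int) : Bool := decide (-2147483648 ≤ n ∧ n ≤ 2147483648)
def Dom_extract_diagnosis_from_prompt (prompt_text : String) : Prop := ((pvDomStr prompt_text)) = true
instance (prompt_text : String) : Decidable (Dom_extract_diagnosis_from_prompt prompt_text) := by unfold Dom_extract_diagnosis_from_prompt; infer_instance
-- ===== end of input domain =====

-- B makes two staged passes (flat keyword->tag scan collecting matched tags, then a pure decision over the tags) instead of A's interleaved short-circuit substring tests (objective: alternative).


-- ===== PORT A =====
def extract_diagnosis_from_prompt (prompt_text : String) : Option String :=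
  let prompt_lower := PySem.Str.lower prompt_text
  if ["depressed", "sadness", "hopeless", "worthless"].any (fun w => PySem.Str.isIn w prompt_lower) then
    if PySem.Str.isIn "manic" prompt_lower || PySem.Str.isIn "mania" prompt_lower then
      some "Bipolar Disorder"
    else
      some "Major Depressive Disorder"
  else if ["anxious", "worry", "panic", "fear"].any (fun w => PySem.Str.isIn w prompt_lower) then
    if PySem.Str.isIn "social" prompt_lower || PySem.Str.isIn "people" prompt_lower then
      some "Social Anxiety Disorder"
    else if PySem.Str.isIn "panic" prompt_lower || PySem.Str.isIn "attack" prompt_lower then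
      some "Panic Disorder"
    else
      some "Generalized Anxiety Disorder"
  else if ["trauma", "ptsd", "flashback", "nightmare"].any (fun w => PySem.Str.isIn w prompt_lower) then
    some "Post-Traumatic Stress Disorder"
  else if ["adjust", "stressor", "life change"].any (fun w => PySem.Str.isIn w prompt_lower) then
    some "Adjustment Disorder"
  else
    none

-- ===== PORT B =====
-- B-side helper: the flat keyword -> concept-tag table (mirrors Source B's KEYWORD_TAGS)
def pvKeywordTags : List (String × String) :=
  [ ("depressed", "depr"), ("sadness", "depr"), ("hopeless", "depr"), ("worthless", "depr"),
    ("manic", "manic"), ("mania", "manic"),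
    ("anxious", "anx"), ("worry", "anx"), ("panic", "anx"), ("fear", "anx"),
    ("social", "soc"), ("people", "soc"),
    ("panic", "pat"), ("attack", "pat"),
    ("trauma", "tra"), ("ptsd", "tra"), ("flashback", "tra"), ("nightmare", "tra"),
    ("adjust", "adj"), ("stressor", "adj"), ("life change", "adj") ]

def extract_diagnosis_from_prompt_alt (prompt_text : String) : Option String :=
  let p := PySem.Str.lower prompt_text
  let tags := (pvKeywordTags.filter (fun kv => PySem.Str.isIn kv.1 p)).map Prod.snd
  if tags.contains "depr" then
    if tags.contains "manic" then some "Bipolar Disorder" else some "Major Depressive Disorder"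
  else if tags.contains "anx" then
    if tags.contains "soc" then some "Social Anxiety Disorder"
    else if tags.contains "pat" then some "Panic Disorder"
    else some "Generalized Anxiety Disorder"
  else if tags.contains "tra" then
    some "Post-Traumatic Stress Disorder"
  else if tags.contains "adj" then
    some "Adjustment Disorder"
  else
    none

-- ===== PRECONDITION & SPEC =====
def Spec_extract_diagnosis_from_prompt (prompt_text : String) (out : Option String) : Prop := out = extract_diagnosis_from_prompt_alt prompt_text
instance (prompt_text : String) (out : Option String) : Decidable (Spec_extract_diagnosis_from_prompt prompt_text out) := by unfold Spec_extract_diagnosis_from_prompt; infer_instance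

-- ===== CLAIM =====
def Claim_equal_extract_diagnosis_from_prompt : Prop := ∀ (prompt_text : String), Dom_extract_diagnosis_from_prompt prompt_text → Spec_extract_diagnosis_from_prompt prompt_text (extract_diagnosis_from_prompt prompt_text)

-- ===== LEMMAS AND PROOFS =====
-- membership in the tag list = some table row with that tag has its keyword in the text
theorem pv_contains_map_filter {α β : Type} [BEq β] [LawfulBEq β] (l : List (α × β)) (p : α × β → Bool) (k : β) :
    ((l.filter p).map Prod.snd).contains k = l.any (fun kv => p kv && kv.2 == k) := by
  induction l with
  | nil => rfl
  | cons hd tl ih =>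
      simp only [List.filter_cons, List.any_cons]
      by_cases h : p hd = true
      · simp only [h, if_pos, Bool.true_and, List.map_cons, List.contains_cons, ih]
        have : (k == hd.2) = (hd.2 == k) := by
          by_cases hk : k = hd.2 <;> simp [hk, Ne.symm]
        rw [this]
      · simp only [h, if_neg, Bool.false_and, Bool.false_or, ih, Bool.not_eq_true]

-- ===== VERDICT =====
theorem extract_diagnosis_from_prompt_spec : Claim_equal_extract_diagnosis_from_prompt := by
  intro p _
  unfold Spec_extract_diagnosis_from_prompt extract_diagnosis_from_prompt
    extract_diagnosis_from_prompt_alt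
  simp only [pv_contains_map_filter, pvKeywordTags, List.any_cons, List.any_nil]
  simp only [show (("depr" : String) == "depr") = true from rfl]
  norm_num
  split_ifs <;> simp_all
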